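-- pv_equiv track=rewrite | github.com/nocode-ecosdeliderazgo/Agente-Ventas-Brenda-Whatsapp | app/application/usecases/predictive_analytics_use_case.py | _analyze_question_repetition
-- ===== SOURCE A (Python) =====
-- from typing import Dict, List, Optional, Tuple
--
-- def _analyze_question_repetition(user_data: Dict) -> int:
--     """Analiza repetición de preguntas"""
--     message_history = user_data.get("message_history", [])
--
--     questions = []
--     for message in message_history[-10:]:  # Últimos 10 mensajes
--         if "?" in message or any(word in message.lower() for word in ["cuanto", "cuando", "como", "donde", "que"]):
--             # Extraer keywords principales
--             words = set(word.lower() for word in message.split() if len(word) > 3)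
--             questions.append(words)
--
--     # Buscar similitudes
--     repetitions = 0
--     for i in range(len(questions)):
--         for j in range(i + 1, len(questions)):
--             if len(questions[i] & questions[j]) >= 2:  # Al menos 2 palabras comunes
--                 repetitions += 1
--
--     return repetitions
-- ===== SOURCE B (Python) =====
-- def _analyze_question_repetition(user_data):
--     """Analiza repeticion de preguntas (inverted-index reimplementation)."""
--     message_history = user_data.get("message_history", [])
--     question_words = ["cuanto", "cuando", "como", "donde", "que"]
--
--     def is_question(m):
--         return "?" in m or any(w in m.lower() for w in question_words)
--
--     def keywords(m):
--         return list(dict.fromkeys(w.lower() for w in m.split() if len(w) > 3))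
--
--     questions = [keywords(m) for m in message_history[-10:] if is_question(m)]
--
--     repetitions = 0
--     index = {}  # keyword -> indices of earlier questions containing it
--     for j, kws in enumerate(questions):
--         shared = {}  # earlier question index -> number of common keywords
--         for w in kws:
--             for i in index.get(w, []):
--                 shared[i] = shared.get(i, 0) + 1
--         repetitions += sum(1 for c in shared.values() if c >= 2)
--         for w in kws:
--             index.setdefault(w, []).append(j)
--     return repetitions
-- ===== Notes on version B (the rewrite author's own statement) =====
-- stated objective: alternative
-- what changed: The O(n^2) nested pairwise set-intersection scan is replaced by an inverted index (keyword -> earlier question indices): each question queries the index to get a per-earlier-question shared-keyword counter and counts earlier questions sharing >= 2 keywords, so no pair of questions is ever intersected directly.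
import Mathlib
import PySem

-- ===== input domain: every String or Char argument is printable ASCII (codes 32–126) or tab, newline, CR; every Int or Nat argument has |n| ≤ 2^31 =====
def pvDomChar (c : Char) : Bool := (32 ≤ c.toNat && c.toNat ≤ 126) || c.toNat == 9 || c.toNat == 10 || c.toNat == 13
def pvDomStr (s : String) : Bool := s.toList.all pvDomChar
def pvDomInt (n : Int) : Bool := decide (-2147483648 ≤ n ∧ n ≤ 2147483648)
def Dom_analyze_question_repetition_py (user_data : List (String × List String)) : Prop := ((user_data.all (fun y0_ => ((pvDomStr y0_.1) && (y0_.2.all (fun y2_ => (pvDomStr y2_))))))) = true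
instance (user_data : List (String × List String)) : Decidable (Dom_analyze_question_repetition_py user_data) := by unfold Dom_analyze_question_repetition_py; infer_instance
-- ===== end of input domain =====

-- B replaces the nested pairwise set-intersection scan by an inverted index
-- (keyword → indices of earlier questions), counting earlier questions that share
-- ≥ 2 keywords with the current one; same return value (objective: alternative).

-- ===== PORT A =====
def analyze_question_repetition_py (user_data : List (String × List String)) : Int :=
  let message_history := (PySem.Dict.mk user_data).getD "message_history" []
  let questions : List (PySem.Set String) :=
    (PySem.List.slice message_history (some (-10)) none).foldl
      (fun qs message =>
        if PySem.Str.isIn "?" message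
            || (["cuanto", "cuando", "como", "donde", "que"].any
                  (fun word => PySem.Str.isIn word (PySem.Str.lower message))) then
          qs ++ [PySem.Set.ofList
            (((PySem.Str.split₀ message).filter (fun word => 3 < PySem.Str.len word)).map
              (fun word => PySem.Str.lower word))]
        else qs) []
  (PySem.List.pyRange 0 (questions.length : Int)).foldl
    (fun repetitions i =>
      (PySem.List.pyRange (i + 1) (questions.length : Int)).foldl
        (fun repetitions j =>
          if 2 ≤ PySem.Set.len (PySem.Set.inter (PySem.List.pyGetD questions i [])
                                  (PySem.List.pyGetD questions j [])) then
            repetitions + 1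
          else repetitions)
        repetitions) 0

-- ===== PORT B =====
def analyze_question_repetition_py_alt (user_data : List (String × List String)) : Int :=
  let message_history := (PySem.Dict.mk user_data).getD "message_history" []
  let question_words : List String := ["cuanto", "cuando", "como", "donde", "que"]
  let is_question : String → Bool := fun m =>
    PySem.Str.isIn "?" m || question_words.any (fun w => PySem.Str.isIn w (PySem.Str.lower m))
  let keywords : String → List String := fun m =>
    PySem.List.dedup (((PySem.Str.split₀ m).filter (fun w => 3 < PySem.Str.len w)).map
      (fun w => PySem.Str.lower w))
  let questions :=
    ((PySem.List.slice message_history (some (-10)) none).filter is_question).map keywords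
  let result :=
    (PySem.List.enumerate questions).foldl
      (fun (acc : Int × PySem.Dict String (List Int)) jk =>
        let shared : PySem.Dict Int Int :=
          jk.2.foldl
            (fun sh w => (acc.2.getD w []).foldl (fun sh i => sh.insert i (sh.getD i 0 + 1)) sh)
            PySem.Dict.empty
        let repetitions :=
          acc.1 + shared.values.foldl (fun s c => if 2 ≤ c then s + 1 else s) 0
        let index := jk.2.foldl (fun d w => d.modify w [] (fun l => l ++ [jk.1])) acc.2
        (repetitions, index))
      (0, PySem.Dict.empty)
  result.1

-- ===== PRECONDITION & SPEC =====
def Spec_analyze_question_repetition_py (user_data : List (String × List String)) (out : Int) : Prop := out = analyze_question_repetition_py_alt user_data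
instance (user_data : List (String × List String)) (out : Int) : Decidable (Spec_analyze_question_repetition_py user_data out) := by unfold Spec_analyze_question_repetition_py; infer_instance

-- ===== CLAIM (what is proved, stated in full; the proofs are below) =====
def Claim_equal_analyze_question_repetition_py : Prop := ∀ (user_data : List (String × List String)), Dom_analyze_question_repetition_py user_data → Spec_analyze_question_repetition_py user_data (analyze_question_repetition_py user_data)

-- ===== LEMMAS AND PROOFS =====

-- the (identical) question list both ports build from the history
def qrKw (m : String) : List String :=
  PySem.Set.ofList (((PySem.Str.split₀ m).filter (fun w => 3 < PySem.Str.len w)).map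
    (fun w => PySem.Str.lower w))

def qrIsQ (m : String) : Bool :=
  PySem.Str.isIn "?" m
    || (["cuanto", "cuando", "como", "donde", "que"].any
          (fun w => PySem.Str.isIn w (PySem.Str.lower m)))

-- pairwise test used by A (i, j : Int index into Q)
def qrC (Q : List (List String)) (i j : Int) : Bool :=
  decide (2 ≤ PySem.Set.len (PySem.Set.inter (PySem.List.pyGetD Q i [])
            (PySem.List.pyGetD Q j [])))

-- index positions of the questions among the first n that contain w
def qrPos (Q : List (List String)) (n : Nat) (w : String) : List Int :=
  ((List.range n).filter (fun i => (Q.getD i []).contains w)).map (Nat.cast : Nat → Int)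

theorem qr_inter_len_comm {a b : List String} (ha : a.Nodup) (hb : b.Nodup) :
    (a.filter (fun x => b.contains x)).length = (b.filter (fun x => a.contains x)).length := by
  classical
  rw [← List.toFinset_card_of_nodup (ha.filter _), ← List.toFinset_card_of_nodup (hb.filter _)]
  congr 1
  ext x
  simp
  tauto

theorem qr_A_eq (Q : List (List String)) :
    (PySem.List.pyRange 0 (Q.length : Int)).foldl
      (fun repetitions i =>
        (PySem.List.pyRange (i + 1) (Q.length : Int)).foldl
          (fun repetitions j =>
            if 2 ≤ PySem.Set.len (PySem.Set.inter (PySem.List.pyGetD Q i [])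
                     (PySem.List.pyGetD Q j [])) then repetitions + 1 else repetitions)
          repetitions) 0
    = ((PySem.List.pyRange 0 (Q.length : Int)).map
        (fun i => ((PySem.List.pyRange (i + 1) (Q.length : Int)).countP (fun j => qrC Q i j) : Int))).sum := by
  simp only [PySem.List.foldl_ite_add_one]
  rw [PySem.List.foldl_add]
  simp [qrC]

theorem qr_sum_ite (l : List Int) (p : Int → Bool) :
    (l.map (fun x => if p x then (1 : Int) else 0)).sum = (l.countP p : Int) := by
  induction l with
  | nil => simp
  | cons a t ih =>
    by_cases h : p a <;> simp [h, ih] <;> ring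

theorem qr_swap (Q : List (List String)) (n : Nat) :
    ((PySem.List.pyRange 0 (n : Int)).map
        (fun i => ((PySem.List.pyRange (i + 1) (n : Int)).countP (fun j => qrC Q i j) : Int))).sum
    = ((PySem.List.pyRange 0 (n : Int)).map
        (fun j => ((PySem.List.pyRange 0 j).countP (fun i => qrC Q i j) : Int))).sum := by
  induction n with
  | zero => simp [PySem.List.pyRange_one_eq_nil]
  | succ n ih =>
    have hcast : ((n + 1 : Nat) : Int) = (n : Int) + 1 := by push_cast; ring
    rw [hcast, PySem.List.pyRange_one_succ_right (by positivity)]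
    simp only [List.map_append, List.sum_append, List.map_cons, List.map_nil]
    have hrow : ∀ i : Int, i ∈ PySem.List.pyRange 0 (n : Int) →
        ((PySem.List.pyRange (i + 1) ((n : Int) + 1)).countP (fun j => qrC Q i j) : Int)
        = ((PySem.List.pyRange (i + 1) (n : Int)).countP (fun j => qrC Q i j) : Int)
          + (if qrC Q i (n : Int) then (1 : Int) else 0) := by
      intro i hi
      rw [PySem.List.mem_pyRange_one] at hi
      rw [PySem.List.pyRange_one_succ_right (by omega), List.countP_append]
      by_cases h : qrC Q i (n : Int) <;> simp [h]
    rw [List.map_congr_left hrow]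
    have hsplit : ((PySem.List.pyRange 0 (n : Int)).map
        (fun i => ((PySem.List.pyRange (i + 1) (n : Int)).countP (fun j => qrC Q i j) : Int)
          + (if qrC Q i (n : Int) then (1 : Int) else 0))).sum
        = ((PySem.List.pyRange 0 (n : Int)).map
            (fun i => ((PySem.List.pyRange (i + 1) (n : Int)).countP (fun j => qrC Q i j) : Int))).sum
          + ((PySem.List.pyRange 0 (n : Int)).map
              (fun i => if qrC Q i (n : Int) then (1 : Int) else 0)).sum := by
      induction (PySem.List.pyRange 0 (n : Int)) with
      | nil => simp
      | cons a t iht => simp [iht]; ring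
    rw [hsplit, qr_sum_ite, ih]
    have hlast : (PySem.List.pyRange ((n : Int) + 1) ((n : Int) + 1)).countP (fun j => qrC Q (n : Int) j) = 0 := by
      rw [PySem.List.pyRange_one_eq_nil le_rfl]; rfl
    rw [hlast]
    simp

theorem qr_mem_qrPos (Q : List (List String)) (n : Nat) (w : String) (i : Int) :
    i ∈ qrPos Q n w ↔ 0 ≤ i ∧ i < (n : Int) ∧ (Q.getD i.toNat []).contains w := by
  unfold qrPos
  constructor
  · intro h
    obtain ⟨k, hk, rfl⟩ := List.mem_map.mp h
    obtain ⟨hkr, hc⟩ := List.mem_filter.mp hk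
    rw [List.mem_range] at hkr
    refine ⟨by positivity, by exact_mod_cast hkr, by simpa using hc⟩
  · rintro ⟨h0, hn, hc⟩
    apply List.mem_map.mpr
    exact ⟨i.toNat, List.mem_filter.mpr ⟨List.mem_range.mpr (by omega), hc⟩, by omega⟩

theorem qr_nodup_qrPos (Q : List (List String)) (n : Nat) (w : String) :
    (qrPos Q n w).Nodup := by
  unfold qrPos
  apply List.Nodup.map
  · intro a b h; exact_mod_cast h
  · exact (List.nodup_range).filter _

theorem qr_count_nodup {α : Type} [BEq α] [LawfulBEq α] {l : List α} (h : l.Nodup) (a : α) :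
    l.count a = if a ∈ l then 1 else 0 := by
  by_cases hm : a ∈ l
  · simp [hm, List.count_eq_one_of_mem h hm]
  · simp [hm, List.count_eq_zero_of_not_mem hm]

theorem qr_qrPos_succ (Q : List (List String)) (n : Nat) (w : String) :
    qrPos Q (n + 1) w
      = qrPos Q n w ++ (if (Q.getD n []).contains w then [(n : Int)] else []) := by
  by_cases h : (Q.getD n []).contains w <;>
    simp only [qrPos, List.range_succ, List.filter_append, List.map_append] <;>
    (congr 1; rw [List.filter_singleton]; simp only [List.getD, List.contains_iff_mem] at h; simp [h])

-- index update step
theorem qr_idx_step (Q : List (List String)) (n : Nat) (q : List String)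
    (hq : Q.getD n [] = q) (hnd : q.Nodup)
    (idx : PySem.Dict String (List Int))
    (hidx : ∀ w, idx.getD w [] = qrPos Q n w) (w : String) :
    (q.foldl (fun d v => d.modify v [] (fun l => l ++ [(n : Int)])) idx).getD w []
      = qrPos Q (n + 1) w := by
  have hmap : q.foldl (fun d v => d.modify v [] (fun l => l ++ [(n : Int)])) idx
      = (q.map (fun v => (v, (n : Int)))).foldl
          (fun d p => d.modify p.1 [] (fun l => l ++ [p.2])) idx := by
    rw [List.foldl_map]
  rw [hmap, PySem.Dict.getD_foldl_modify_append, hidx, qr_qrPos_succ, hq]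
  congr 1
  rw [List.filter_map]
  have : ((fun p => p.1 == w) ∘ fun v => (v, (n : Int))) = (fun v => v == w) := rfl
  rw [this, List.filter_beq, qr_count_nodup hnd]
  by_cases h : w ∈ q <;> simp [h]

theorem qr_sum_ite_nat {α : Type} (l : List α) (p : α → Bool) :
    (l.map (fun x => if p x then (1 : Nat) else 0)).sum = l.countP p := by
  induction l with
  | nil => simp
  | cons a t ih => by_cases h : p a <;> simp [h, ih] <;> omega

theorem qr_getD_nodup (Q : List (List String)) (hQ : ∀ x ∈ Q, x.Nodup) (k : Nat) :
    (Q.getD k []).Nodup := by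
  by_cases h : k < Q.length
  · exact hQ _ (by rw [List.getD_eq_getElem _ _ h]; exact List.getElem_mem h)
  · rw [List.getD_eq_default _ _ (by omega)]; simp

theorem qr_contrib (Q : List (List String)) (hQ : ∀ x ∈ Q, x.Nodup) (n : Nat) (_hn : n < Q.length)
    (q : List String) (hq : Q.getD n [] = q)
    (idx : PySem.Dict String (List Int)) (hidx : ∀ w, idx.getD w [] = qrPos Q n w) :
    ((q.foldl (fun sh w => (idx.getD w []).foldl (fun sh i => sh.insert i (sh.getD i 0 + 1)) sh)
        (PySem.Dict.empty : PySem.Dict Int Int)).values.foldl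
          (fun s c => if 2 ≤ c then s + 1 else s) (0 : Int))
    = ((PySem.List.pyRange 0 (n : Int)).countP (fun i => qrC Q i (n : Int)) : Int) := by
  have hqnd : q.Nodup := hq ▸ qr_getD_nodup Q hQ n
  -- flatten the nested fold and recognise a Counter
  have hflat : q.foldl (fun sh w => (idx.getD w []).foldl
        (fun sh i => sh.insert i (sh.getD i 0 + 1)) sh) (PySem.Dict.empty : PySem.Dict Int Int)
      = PySem.Dict.counter (q.flatMap (fun w => idx.getD w [])) := by
    rw [← PySem.Dict.foldl_insert_getD_add_one_eq_counter, List.foldl_flatMap]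
  simp only [hflat]
  set C := q.flatMap (fun w => idx.getD w []) with hC
  -- the count of i in C is the number of shared keywords
  have hcount : ∀ i : Int, 0 ≤ i → i < (n : Int) →
      C.count i = (q.filter (fun w => (Q.getD i.toNat []).contains w)).length := by
    intro i h0 hi
    rw [hC, List.count_flatMap]
    have : ∀ w ∈ q, (List.count i ∘ fun w => idx.getD w []) w
        = (fun w => if (Q.getD i.toNat []).contains w then (1 : Nat) else 0) w := by
      intro w _
      simp only [Function.comp, hidx]
      rw [qr_count_nodup (qr_nodup_qrPos Q n w)]
      simp only [qr_mem_qrPos]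
      by_cases hc : (Q.getD i.toNat []).contains w <;> simp [hc, h0, hi]
    rw [List.map_congr_left this, qr_sum_ite_nat, List.countP_eq_length_filter]
  have hmemC : ∀ i : Int, i ∈ C ↔ ∃ w ∈ q, 0 ≤ i ∧ i < (n : Int) ∧ (Q.getD i.toNat []).contains w := by
    intro i
    rw [hC, List.mem_flatMap]
    constructor
    · rintro ⟨w, hw, hm⟩; rw [hidx, qr_mem_qrPos] at hm; exact ⟨w, hw, hm⟩
    · rintro ⟨w, hw, hm⟩; exact ⟨w, hw, by rw [hidx, qr_mem_qrPos]; exact hm⟩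
  -- the test 2 ≤ count is A's pairwise test
  have hiff : ∀ i : Int, 0 ≤ i → i < (n : Int) →
      ((2 : Int) ≤ (C.count i : Int) ↔ qrC Q i (n : Int) = true) := by
    intro i h0 hi
    have hnd_i : (Q.getD i.toNat []).Nodup := qr_getD_nodup Q hQ i.toNat
    simp only [qrC, decide_eq_true_eq]
    rw [PySem.List.pyGetD_of_nonneg (h := h0), PySem.List.pyGetD_natCast]
    simp only [PySem.Set.len, PySem.Set.inter, PySem.Set.contains_eq_listContains]
    rw [hq, qr_inter_len_comm hnd_i hqnd, ← hcount i h0 hi]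
  -- values of the counter, then count the ≥2 entries
  have hval : (PySem.Dict.counter C).values
      = (PySem.Set.ofList C).map (fun k => (C.count k : Int)) := by
    show ((PySem.Dict.counter C).items.map (fun p => p.2)) = _
    rw [PySem.Dict.items_counter, List.map_map]
    rfl
  rw [hval, PySem.List.foldl_ite_add_one, List.countP_map]
  simp only [Function.comp_def]
  -- compare the two filtered index lists as permutations
  have hperm : List.Perm
      ((PySem.Set.ofList C).filter (fun k => decide ((2:Int) ≤ (C.count k : Int))))
      ((PySem.List.pyRange 0 (n : Int)).filter (fun i => qrC Q i (n : Int))) := by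
    rw [List.perm_ext_iff_of_nodup ((PySem.Set.nodup_ofList C).filter _)
      ((PySem.List.nodup_pyRange_one 0 (n : Int)).filter _)]
    intro k
    simp only [List.mem_filter, PySem.Set.mem_ofList, PySem.List.mem_pyRange_one,
      decide_eq_true_eq]
    constructor
    · rintro ⟨hmem, h2⟩
      obtain ⟨w, _, h0, hi, _⟩ := (hmemC k).mp hmem
      exact ⟨⟨h0, hi⟩, (hiff k h0 hi).mp h2⟩
    · rintro ⟨⟨h0, hi⟩, hc⟩
      have h2 := (hiff k h0 hi).mpr hc
      have hpos : 0 < C.count k := by omega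
      exact ⟨List.count_pos_iff.mp hpos, h2⟩
  simp only [List.countP_eq_length_filter]
  rw [hperm.length_eq]
  omega

def qrStep (acc : Int × PySem.Dict String (List Int)) (jk : Int × List String) :
    Int × PySem.Dict String (List Int) :=
  let shared : PySem.Dict Int Int :=
    jk.2.foldl
      (fun sh w => (acc.2.getD w []).foldl (fun sh i => sh.insert i (sh.getD i 0 + 1)) sh)
      PySem.Dict.empty
  let repetitions :=
    acc.1 + shared.values.foldl (fun s c => if 2 ≤ c then s + 1 else s) 0
  let index := jk.2.foldl (fun d w => d.modify w [] (fun l => l ++ [jk.1])) acc.2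
  (repetitions, index)

theorem qr_loop (Q : List (List String)) (hQ : ∀ x ∈ Q, x.Nodup) :
    ∀ (qs pre : List (List String)), Q = pre ++ qs →
    ∀ (r0 : Int) (idx : PySem.Dict String (List Int)),
    (∀ w, idx.getD w [] = qrPos Q pre.length w) →
    ((PySem.List.enumerate qs (pre.length : Int)).foldl qrStep (r0, idx)).1
    = r0 + ((PySem.List.pyRange (pre.length : Int) (Q.length : Int)).map
        (fun j => ((PySem.List.pyRange 0 j).countP (fun i => qrC Q i j) : Int))).sum := by
  intro qs
  induction qs with
  | nil =>
    intro pre hpre r0 idx _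
    have : Q.length = pre.length := by rw [hpre]; simp
    simp [PySem.List.enumerate, this, PySem.List.pyRange_one_eq_nil le_rfl]
  | cons q rest ih =>
    intro pre hpre r0 idx hidx
    have hn : pre.length < Q.length := by rw [hpre]; simp
    have hq : Q.getD pre.length [] = q := by
      rw [hpre, List.getD_eq_getElem?_getD, List.getElem?_append_right le_rfl]
      simp
    have henum : PySem.List.enumerate (q :: rest) (pre.length : Int)
        = ((pre.length : Int), q) :: PySem.List.enumerate rest ((pre.length : Int) + 1) := rfl
    rw [henum, List.foldl_cons]
    have hstep : qrStep (r0, idx) ((pre.length : Int), q)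
        = (r0 + ((q.foldl (fun sh w => (idx.getD w []).foldl
              (fun sh i => sh.insert i (sh.getD i 0 + 1)) sh)
              (PySem.Dict.empty : PySem.Dict Int Int)).values.foldl
                (fun s c => if 2 ≤ c then s + 1 else s) (0 : Int)),
           q.foldl (fun d w => d.modify w [] (fun l => l ++ [(pre.length : Int)])) idx) := rfl
    rw [hstep]
    have hpre' : Q = (pre ++ [q]) ++ rest := by rw [hpre]; simp
    have hlen' : ((pre ++ [q]).length : Int) = (pre.length : Int) + 1 := by simp
    have hidx' : ∀ w, (q.foldl (fun d w => d.modify w [] (fun l => l ++ [(pre.length : Int)])) idx).getD w []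
        = qrPos Q (pre ++ [q]).length w := by
      intro w
      have := qr_idx_step Q pre.length q hq (hq ▸ qr_getD_nodup Q hQ pre.length) idx hidx w
      simpa using this
    have := ih (pre ++ [q]) hpre'
      (r0 + ((q.foldl (fun sh w => (idx.getD w []).foldl
          (fun sh i => sh.insert i (sh.getD i 0 + 1)) sh)
          (PySem.Dict.empty : PySem.Dict Int Int)).values.foldl
            (fun s c => if 2 ≤ c then s + 1 else s) (0 : Int)))
      (q.foldl (fun d w => d.modify w [] (fun l => l ++ [(pre.length : Int)])) idx) hidx'
    rw [hlen'] at this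
    rw [this, qr_contrib Q hQ pre.length hn q hq idx hidx]
    have hcons : PySem.List.pyRange (pre.length : Int) (Q.length : Int)
        = (pre.length : Int) :: PySem.List.pyRange ((pre.length : Int) + 1) (Q.length : Int) := by
      apply PySem.List.pyRange_one_cons
      exact_mod_cast hn
    rw [hcons, List.map_cons, List.sum_cons]
    ring

theorem qr_B_eq (Q : List (List String)) (hQ : ∀ q ∈ Q, q.Nodup) :
    ((PySem.List.enumerate Q).foldl qrStep
      ((0 : Int), (PySem.Dict.empty : PySem.Dict String (List Int)))).1
    = ((PySem.List.pyRange 0 (Q.length : Int)).map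
        (fun j => ((PySem.List.pyRange 0 j).countP (fun i => qrC Q i j) : Int))).sum := by
  have h0 : ∀ w, (PySem.Dict.empty : PySem.Dict String (List Int)).getD w [] = qrPos Q 0 w := by
    intro w
    simp [qrPos, PySem.Dict.getD_empty]
  have h := qr_loop Q hQ Q [] (by simp) 0 PySem.Dict.empty h0
  simpa using h

theorem qr_nodup_map_ofList {α : Type} (f : α → List String) (l : List α) :
    ∀ q ∈ l.map (fun m => PySem.Set.ofList (f m)), q.Nodup := by
  intro q hq
  obtain ⟨m, _, rfl⟩ := List.mem_map.mp hq
  exact PySem.Set.nodup_ofList _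

-- ===== VERDICT (by name: the statement is the Claim_ definition above) =====
theorem analyze_question_repetition_py_spec : Claim_equal_analyze_question_repetition_py := by
  intro ud _
  unfold Spec_analyze_question_repetition_py
  simp only [analyze_question_repetition_py, analyze_question_repetition_py_alt,
    PySem.List.foldl_append_if, List.nil_append, PySem.List.dedup_eq_ofList]
  rw [qr_A_eq, qr_swap]
  exact (qr_B_eq _ (qr_nodup_map_ofList _ _)).symm
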